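-- pv_equiv track=rewrite | github.com/chiragcode11/WebUnpack-Backend | services/css_analyzer.py | _detect_responsive_approach
-- ===== SOURCE A (Python) =====
-- from typing import Dict, List, Set
--
-- def _detect_responsive_approach(media_queries: List[str]) -> str:
--     mobile_first = sum(1 for mq in media_queries if 'min-width' in mq)
--     desktop_first = sum(1 for mq in media_queries if 'max-width' in mq)
--
--     if mobile_first > desktop_first:
--         return 'mobile_first'
--     elif desktop_first > mobile_first:
--         return 'desktop_first'
--     else:
--         return 'mixed'
-- ===== SOURCE B (Python) =====
-- def _detect_responsive_approach(media_queries):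
--     # Stage 1: flatten the queries into a stream of votes.
--     votes = []
--     for mq in media_queries:
--         if 'min-width' in mq:
--             votes.append('mobile_first')
--         if 'max-width' in mq:
--             votes.append('desktop_first')
--     # Stage 2: Boyer-Moore majority cancellation over the two-symbol stream;
--     # with only two symbols the surviving candidate is exactly the strict
--     # majority and a zero surplus means a tie.
--     candidate, count = 'mixed', 0
--     for v in votes:
--         if count == 0:
--             candidate, count = v, 1
--         elif v == candidate:
--             count += 1
--         else:
--             count -= 1
--     return candidate if count > 0 else 'mixed'
-- ===== Notes on version B (the rewrite author's own statement) =====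
-- stated objective: alternative
-- what changed: Replaces A's two counting comprehensions plus numeric comparison with a two-stage Boyer-Moore majority vote: the queries are first flattened into a stream of 'mobile_first'/'desktop_first' votes (a query containing both substrings emits both), then a cancellation pass keeps only a candidate label and its surplus; with a two-symbol stream the surviving candidate is exactly the strict majority and zero surplus is a tie ('mixed').
import Mathlib
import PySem

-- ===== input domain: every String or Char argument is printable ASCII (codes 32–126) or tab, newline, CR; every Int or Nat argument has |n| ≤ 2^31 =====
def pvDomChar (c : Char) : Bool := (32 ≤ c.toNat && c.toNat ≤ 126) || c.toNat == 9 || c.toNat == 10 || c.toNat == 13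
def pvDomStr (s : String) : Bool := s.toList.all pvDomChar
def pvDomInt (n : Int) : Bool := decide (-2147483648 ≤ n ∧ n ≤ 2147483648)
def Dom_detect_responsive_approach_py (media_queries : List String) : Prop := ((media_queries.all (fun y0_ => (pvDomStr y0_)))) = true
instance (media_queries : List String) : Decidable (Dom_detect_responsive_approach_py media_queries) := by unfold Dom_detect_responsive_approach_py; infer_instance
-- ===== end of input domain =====

-- B replaces A's count-and-compare by a two-stage Boyer-Moore majority vote over a flattened vote stream (objective: alternative).
-- ===== PORT A =====
def detect_responsive_approach_py (media_queries : List String) : String :=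
  let mobile_first : Int :=
    media_queries.foldl (fun acc mq => if PySem.Str.isIn "min-width" mq then acc + 1 else acc) 0
  let desktop_first : Int :=
    media_queries.foldl (fun acc mq => if PySem.Str.isIn "max-width" mq then acc + 1 else acc) 0
  if mobile_first > desktop_first then "mobile_first"
  else if desktop_first > mobile_first then "desktop_first"
  else "mixed"

-- ===== PORT B =====
def detect_responsive_approach_py_alt (media_queries : List String) : String :=
  -- Stage 1: flatten the queries into a stream of votes
  let votes : List String :=
    media_queries.foldl (fun votes mq =>
      let votes := if PySem.Str.isIn "min-width" mq then votes ++ ["mobile_first"] else votes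
      if PySem.Str.isIn "max-width" mq then votes ++ ["desktop_first"] else votes) []
  -- Stage 2: Boyer-Moore majority cancellation
  let st : String × Int :=
    votes.foldl (fun st v =>
      if st.2 == 0 then (v, 1)
      else if v == st.1 then (st.1, st.2 + 1)
      else (st.1, st.2 - 1)) ("mixed", 0)
  if st.2 > 0 then st.1 else "mixed"

-- ===== PRECONDITION & SPEC =====
def Spec_detect_responsive_approach_py (media_queries : List String) (out : String) : Prop := out = detect_responsive_approach_py_alt media_queries
instance (media_queries : List String) (out : String) : Decidable (Spec_detect_responsive_approach_py media_queries out) := by unfold Spec_detect_responsive_approach_py; infer_instance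

-- ===== CLAIM (what is proved, stated in full; the proofs are below) =====
def Claim_equal_detect_responsive_approach_py : Prop := ∀ (media_queries : List String), Dom_detect_responsive_approach_py media_queries → Spec_detect_responsive_approach_py media_queries (detect_responsive_approach_py media_queries)

-- ===== LEMMAS AND PROOFS =====

-- the vote stream built by B's first loop, starting from an accumulator
def pvBuild (mqs : List String) (acc : List String) : List String :=
  mqs.foldl (fun votes mq =>
    let votes := if PySem.Str.isIn "min-width" mq then votes ++ ["mobile_first"] else votes
    if PySem.Str.isIn "max-width" mq then votes ++ ["desktop_first"] else votes) acc

-- the votes a single query emits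
def pvVoteOf (mq : String) : List String :=
  (if PySem.Str.isIn "min-width" mq then ["mobile_first"] else [])
    ++ (if PySem.Str.isIn "max-width" mq then ["desktop_first"] else [])

theorem pvBuild_eq_flatMap (mqs : List String) (acc : List String) :
    pvBuild mqs acc = acc ++ mqs.flatMap pvVoteOf := by
  have hstep : (fun (votes : List String) mq =>
      let votes := if PySem.Str.isIn "min-width" mq then votes ++ ["mobile_first"] else votes
      if PySem.Str.isIn "max-width" mq then votes ++ ["desktop_first"] else votes)
      = fun votes mq => votes ++ pvVoteOf mq := by
    funext votes mq
    simp only [pvVoteOf]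
    split_ifs <;> simp
  unfold pvBuild
  rw [hstep, PySem.List.foldl_append_eq_flatMap]

theorem pvCount_mobile (mqs : List String) :
    (mqs.flatMap pvVoteOf).count "mobile_first"
      = mqs.countP (fun mq => PySem.Str.isIn "min-width" mq) := by
  induction mqs with
  | nil => simp
  | cons x xs ih =>
    simp only [List.flatMap_cons, List.count_append, List.countP_cons, ih, pvVoteOf]
    split_ifs <;> simp <;> omega

theorem pvCount_desktop (mqs : List String) :
    (mqs.flatMap pvVoteOf).count "desktop_first"
      = mqs.countP (fun mq => PySem.Str.isIn "max-width" mq) := by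
  induction mqs with
  | nil => simp
  | cons x xs ih =>
    simp only [List.flatMap_cons, List.count_append, List.countP_cons, ih, pvVoteOf]
    split_ifs <;> simp <;> omega

theorem pvMem_voteOf (mqs : List String) (v : String) (h : v ∈ mqs.flatMap pvVoteOf) :
    v = "mobile_first" ∨ v = "desktop_first" := by
  simp only [List.mem_flatMap] at h
  obtain ⟨mq, _, hv⟩ := h
  unfold pvVoteOf at hv
  split_ifs at hv <;> simp_all

-- B's second loop
def pvBM (votes : List String) (st : String × Int) : String × Int :=
  votes.foldl (fun st v =>
    if st.2 == 0 then (v, 1)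
    else if v == st.1 then (st.1, st.2 + 1)
    else (st.1, st.2 - 1)) st

theorem pvBM_cons (x : String) (xs : List String) (st : String × Int) :
    pvBM (x :: xs) st
      = pvBM xs (if st.2 == 0 then (x, 1)
          else if x == st.1 then (st.1, st.2 + 1) else (st.1, st.2 - 1)) := rfl

-- signed reading of a Boyer-Moore state
def pvSigned (st : String × Int) : Int :=
  if st.1 = "mobile_first" then st.2 else -st.2

-- invariant of the cancellation pass on a two-symbol stream:
-- the signed state tracks (#mobile votes - #desktop votes)
theorem pvBM_invariant (votes : List String)
    (hv : ∀ v ∈ votes, v = "mobile_first" ∨ v = "desktop_first") :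
    ∀ (st : String × Int), 0 ≤ st.2 →
    (st.2 = 0 ∨ st.1 = "mobile_first" ∨ st.1 = "desktop_first") →
    pvSigned (pvBM votes st)
        = pvSigned st + votes.count "mobile_first" - votes.count "desktop_first"
      ∧ 0 ≤ (pvBM votes st).2
      ∧ ((pvBM votes st).2 = 0 ∨ (pvBM votes st).1 = "mobile_first"
          ∨ (pvBM votes st).1 = "desktop_first") := by
  induction votes with
  | nil => intro st h1 h2; simpa [pvBM] using ⟨h1, h2⟩
  | cons x xs ih =>
    intro st h1 h2
    have hx := hv x (by simp)
    have hxs : ∀ v ∈ xs, v = "mobile_first" ∨ v = "desktop_first" :=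
      fun v hvmem => hv v (by simp [hvmem])
    rw [pvBM_cons]
    by_cases hz : st.2 = 0
    · rw [if_pos (by simpa using hz)]
      obtain ⟨e, p, q⟩ := ih hxs (x, 1) (by simp) (Or.inr hx)
      refine ⟨?_, p, q⟩
      rw [e]
      rcases hx with h | h <;>
        · subst h; simp [pvSigned, hz]
          omega
    · rw [if_neg (by simpa using hz)]
      rcases h2 with h2 | h2 | h2
      · exact absurd h2 hz
      · rcases hx with h | h
        · rw [if_pos (by simp [h, h2])]
          obtain ⟨e, p, q⟩ := ih hxs (st.1, st.2 + 1) (by simp; omega) (Or.inr (Or.inl h2))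
          refine ⟨?_, p, q⟩
          rw [e]; subst h
          simp [pvSigned, h2]
          omega
        · rw [if_neg (by simp [h, h2])]
          obtain ⟨e, p, q⟩ := ih hxs (st.1, st.2 - 1) (by simp; omega) (Or.inr (Or.inl h2))
          refine ⟨?_, p, q⟩
          rw [e]; subst h
          simp [pvSigned, h2]
          omega
      · rcases hx with h | h
        · rw [if_neg (by simp [h, h2])]
          obtain ⟨e, p, q⟩ := ih hxs (st.1, st.2 - 1) (by simp; omega) (Or.inr (Or.inr h2))
          refine ⟨?_, p, q⟩
          rw [e]; subst h
          simp [pvSigned, h2]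
          omega
        · rw [if_pos (by simp [h, h2])]
          obtain ⟨e, p, q⟩ := ih hxs (st.1, st.2 + 1) (by simp; omega) (Or.inr (Or.inr h2))
          refine ⟨?_, p, q⟩
          rw [e]; subst h
          simp [pvSigned, h2]
          omega

-- A's counters are countP of the membership tests
theorem pvFoldA (mqs : List String) (p : String → Bool) :
    mqs.foldl (fun acc mq => if p mq then acc + 1 else acc) (0 : Int) = mqs.countP p := by
  induction mqs with
  | nil => simp
  | cons x xs ih =>
    have h := PySem.List.foldl_add (l := xs) (a := if p x then (0:Int) + 1 else 0)
    simp only [List.foldl, List.countP_cons]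
    rw [show (fun (acc : Int) mq => if p mq then acc + 1 else acc)
        = fun acc mq => acc + (if p mq then 1 else 0) from by funext a m; split_ifs <;> omega] at ih ⊢
    rw [show (fun (acc : Int) mq => acc + (if p mq then 1 else 0))
        = fun acc mq => acc + (fun mq => if p mq then (1:Int) else 0) mq from rfl,
      PySem.List.foldl_add] at ih ⊢
    split_ifs <;> · simp_all; try omega

-- ===== VERDICT (by name: the statement is the Claim_ definition above) =====
theorem detect_responsive_approach_py_spec : Claim_equal_detect_responsive_approach_py := by
  intro mqs _hd
  unfold Spec_detect_responsive_approach_py detect_responsive_approach_py detect_responsive_approach_py_alt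
  show (if _ then _ else _)
    = (if (pvBM (pvBuild mqs []) ("mixed", 0)).2 > 0
        then (pvBM (pvBuild mqs []) ("mixed", 0)).1 else "mixed")
  set m := mqs.foldl (fun acc mq => if PySem.Str.isIn "min-width" mq then acc + 1 else acc) (0:Int) with hm
  set d := mqs.foldl (fun acc mq => if PySem.Str.isIn "max-width" mq then acc + 1 else acc) (0:Int) with hd
  have hb : pvBuild mqs [] = mqs.flatMap pvVoteOf := by simpa using pvBuild_eq_flatMap mqs []
  have hmem := fun v hv => pvMem_voteOf mqs v (hb ▸ hv)
  have hcm : ((pvBuild mqs []).count "mobile_first" : Int) = m := by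
    rw [hb, pvCount_mobile, hm, pvFoldA]
  have hcd : ((pvBuild mqs []).count "desktop_first" : Int) = d := by
    rw [hb, pvCount_desktop, hd, pvFoldA]
  obtain ⟨e, p, q⟩ := pvBM_invariant (pvBuild mqs []) hmem ("mixed", 0) (by simp) (by simp)
  set st := pvBM (pvBuild mqs []) ("mixed", 0) with hst
  have e' : pvSigned st = m - d := by rw [e, hcm, hcd]; simp [pvSigned]
  unfold pvSigned at e'
  by_cases h1 : st.1 = "mobile_first"
  · rw [if_pos h1] at e'
    split_ifs <;> first | exact h1.symm | omega | rfl
  · rw [if_neg h1] at e'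
    split_ifs <;>
      first
        | omega
        | (rcases q with h | h | h
           · omega
           · exact absurd h h1
           · exact h.symm)
        | rfl
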